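-- pv_equiv track=rewrite | github.com/eliwaksbaum/aoc | 23.py | freeAgent
-- ===== SOURCE A (Python) =====
-- def freeAgent(r, state):
--     wall = len(state[r])
--     for i in range(len(state[r]) - 1, -1, -1):
--         if state[r][i] != r:
--             break
--         else:
--             wall = i
--
--     for j in range(wall):
--         if state[r][j] != None:
--             return j
--
--     return None
-- ===== SOURCE B (Python) =====
-- def freeAgent(r, state):
--     row = state[r]
--     i = len(row) - 1
--     while i >= 0 and row[i] == r:
--         i -= 1
--     ans = None
--     while i >= 0:
--         if row[i] != None:
--             ans = i
--         i -= 1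
--     return ans
-- ===== Notes on version B (the rewrite author's own statement) =====
-- stated objective: alternative
-- what changed: Replaced A's two separate passes (a backward range loop computing the wall, then a forward range loop with early return) by a single continuous backward walk: one index first consumes the trailing run of r, then keeps walking down overwriting an accumulator with each non-None index, so the lowest such index below the wall wins.
import Mathlib
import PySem

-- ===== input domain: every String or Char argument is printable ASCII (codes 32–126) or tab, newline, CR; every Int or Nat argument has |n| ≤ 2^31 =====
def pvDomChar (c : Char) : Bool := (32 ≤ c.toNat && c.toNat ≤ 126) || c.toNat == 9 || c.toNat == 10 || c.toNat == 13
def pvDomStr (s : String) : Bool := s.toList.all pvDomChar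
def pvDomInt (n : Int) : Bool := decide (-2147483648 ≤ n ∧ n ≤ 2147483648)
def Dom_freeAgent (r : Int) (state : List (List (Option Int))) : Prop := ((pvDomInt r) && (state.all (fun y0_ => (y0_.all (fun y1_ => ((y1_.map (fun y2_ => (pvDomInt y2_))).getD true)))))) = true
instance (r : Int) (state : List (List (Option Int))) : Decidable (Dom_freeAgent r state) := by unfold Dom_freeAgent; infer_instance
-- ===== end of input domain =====

-- B replaces A's two range loops (backward wall search, forward first-non-None scan with early
-- return) by a single continuous backward walk with an overwriting accumulator; alternative
-- decomposition, same cost.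


-- ===== PORT A =====
-- first loop: for i in range(len(row)-1, -1, -1): if row[i] != r: break else wall = i
-- (indices produced by the range are always in range, so pyGetD is exact here)
def freeAgentWall (row : List (Option Int)) (r : Int) : List Int → Int → Int
  | [], wall => wall
  | i :: rest, wall =>
    if PySem.List.pyGetD row i none ≠ some r then wall
    else freeAgentWall row r rest i

-- second loop: for j in range(wall): if row[j] != None: return j
def freeAgentFind (row : List (Option Int)) : List Int → Option Int
  | [] => none
  | j :: rest =>
    if PySem.List.pyGetD row j none ≠ none then some j
    else freeAgentFind row rest

def freeAgent (r : Int) (state : List (List (Option Int))) : Option Int :=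
  match PySem.List.pyGet? state r with
  | none => none   -- IndexError on state[r]; excluded by Pre_
  | some row =>
    let wall := freeAgentWall row r (PySem.List.pyRange ((row.length : Int) - 1) (-1) (-1)) (row.length : Int)
    freeAgentFind row (PySem.List.pyRange 0 wall 1)

-- ===== PORT B =====
-- while i >= 0 and row[i] == r: i -= 1   (fuel = len(row) bounds the iterations exactly)
def altSkip (row : List (Option Int)) (r : Int) : Nat → Int → Int
  | 0, i => i
  | n + 1, i =>
    if 0 ≤ i ∧ PySem.List.pyGetD row i none = some r then altSkip row r n (i - 1) else i

-- while i >= 0: if row[i] != None: ans = i; i -= 1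
def altScan (row : List (Option Int)) : Nat → Int → Option Int → Option Int
  | 0, _, ans => ans
  | n + 1, i, ans =>
    if 0 ≤ i then
      altScan row n (i - 1) (if PySem.List.pyGetD row i none ≠ none then some i else ans)
    else ans

def freeAgent_alt (r : Int) (state : List (List (Option Int))) : Option Int :=
  match PySem.List.pyGet? state r with
  | none => none   -- IndexError on state[r]; excluded by Pre_
  | some row =>
    let i := altSkip row r row.length ((row.length : Int) - 1)
    altScan row row.length i none

-- ===== PRECONDITION & SPEC =====
-- Pre_ excludes exactly the inputs where Python raises IndexError on state[r] (both A and B do).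
def Pre_freeAgent (r : Int) (state : List (List (Option Int))) : Prop :=
  PySem.Raise.InRange state.length r
instance (r : Int) (state : List (List (Option Int))) : Decidable (Pre_freeAgent r state) := by
  unfold Pre_freeAgent; infer_instance

def pvWitness_freeAgent : Int × List (List (Option Int)) := (0, [[none, some 0, some 1]])

def Spec_freeAgent (r : Int) (state : List (List (Option Int))) (out : Option Int) : Prop := out = freeAgent_alt r state
instance (r : Int) (state : List (List (Option Int))) (out : Option Int) : Decidable (Spec_freeAgent r state out) := by unfold Spec_freeAgent; infer_instance

-- ===== CLAIM (what is proved, stated in full; the proofs are below) =====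
def Claim_equal_freeAgent : Prop := ∀ (r : Int) (state : List (List (Option Int))), Dom_freeAgent r state → Pre_freeAgent r state → Spec_freeAgent r state (freeAgent r state)

-- ===== LEMMAS AND PROOFS =====

-- proof-side characterisation of the wall: wspec k = A's wall after scanning indices k-1 … 0
def wspec (row : List (Option Int)) (r : Int) : Nat → Nat
  | 0 => 0
  | k + 1 => if row.getD k none = some r then wspec row r k else k + 1

theorem wspec_le (row : List (Option Int)) (r : Int) (k : Nat) : wspec row r k ≤ k := by
  induction k with
  | zero => simp [wspec]
  | succ k ih => simp only [wspec]; split <;> omega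

theorem freeAgentWall_eq (row : List (Option Int)) (r : Int) (k : Nat) :
    freeAgentWall row r (PySem.List.pyRange ((k : Int) - 1) (-1) (-1)) k = (wspec row r k : Int) := by
  induction k with
  | zero =>
    rw [PySem.List.pyRange_neg_one_eq_nil (by omega)]
    simp [freeAgentWall, wspec]
  | succ k ih =>
    have h1 : ((k + 1 : Nat) : Int) - 1 = (k : Int) := by push_cast; ring
    rw [h1, PySem.List.pyRange_neg_one_cons (by omega)]
    simp only [freeAgentWall, PySem.List.pyGetD_natCast, wspec, List.getD_eq_getElem?_getD]
    by_cases h : row[k]?.getD none = some r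
    · simp [h, ih]
    · simp [h]

theorem altSkip_eq (row : List (Option Int)) (r : Int) (k n : Nat) (hk : k ≤ n) :
    altSkip row r n ((k : Int) - 1) = (wspec row r k : Int) - 1 := by
  induction k generalizing n with
  | zero =>
    cases n with
    | zero => simp [altSkip, wspec]
    | succ n => simp [altSkip, wspec]
  | succ k ih =>
    obtain ⟨n, rfl⟩ : ∃ m, n = m + 1 := ⟨n - 1, by omega⟩
    have h1 : ((k + 1 : Nat) : Int) - 1 = (k : Int) := by push_cast; ring
    rw [h1]
    simp only [altSkip, PySem.List.pyGetD_natCast, wspec, List.getD_eq_getElem?_getD]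
    by_cases h : row[k]?.getD none = some r
    · rw [if_pos ⟨by omega, h⟩, if_pos h]
      have := ih n (by omega)
      simpa using this
    · rw [if_neg (by simp [h]), if_neg h]
      push_cast; ring

theorem freeAgentFind_append (row : List (Option Int)) (l1 l2 : List Int) :
    freeAgentFind row (l1 ++ l2) =
      match freeAgentFind row l1 with
      | some j => some j
      | none => freeAgentFind row l2 := by
  induction l1 with
  | nil => simp [freeAgentFind]
  | cons j rest ih =>
    simp only [List.cons_append, freeAgentFind]
    split <;> simp [ih]

theorem altScan_eq (row : List (Option Int)) (w n : Nat) (ans : Option Int) (hw : w ≤ n) :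
    altScan row n ((w : Int) - 1) ans =
      match freeAgentFind row (PySem.List.pyRange 0 (w : Int) 1) with
      | some j => some j
      | none => ans := by
  induction w generalizing n ans with
  | zero =>
    rw [PySem.List.pyRange_one_eq_nil (by omega)]
    cases n with
    | zero => simp [altScan, freeAgentFind]
    | succ n => simp [altScan, freeAgentFind]
  | succ w ih =>
    obtain ⟨n, rfl⟩ : ∃ m, n = m + 1 := ⟨n - 1, by omega⟩
    have h1 : ((w + 1 : Nat) : Int) - 1 = (w : Int) := by push_cast; ring
    rw [h1]
    have hsplit : PySem.List.pyRange 0 ((w + 1 : Nat) : Int) 1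
        = PySem.List.pyRange 0 (w : Int) 1 ++ [(w : Int)] := by
      have : ((w + 1 : Nat) : Int) = (w : Int) + 1 := by push_cast; ring
      rw [this, PySem.List.pyRange_one_succ_right (by omega)]
    rw [hsplit, freeAgentFind_append]
    simp only [altScan, if_pos (by omega : (0:Int) ≤ (w:Int))]
    rw [ih _ _ (by omega)]
    cases hfind : freeAgentFind row (PySem.List.pyRange 0 (w : Int) 1) with
    | some j => simp
    | none =>
      simp only [freeAgentFind]
      split <;> simp

theorem row_case_eq (row : List (Option Int)) (r : Int) :
    freeAgentFind row (PySem.List.pyRange 0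
        (freeAgentWall row r (PySem.List.pyRange ((row.length : Int) - 1) (-1) (-1)) (row.length : Int)) 1)
      = altScan row row.length (altSkip row r row.length ((row.length : Int) - 1)) none := by
  rw [freeAgentWall_eq, altSkip_eq row r row.length row.length le_rfl,
      altScan_eq row _ row.length none (wspec_le row r row.length)]
  cases hfind : freeAgentFind row (PySem.List.pyRange 0 ((wspec row r row.length : Nat) : Int) 1) <;> simp

-- ===== VERDICT (by name: the statement is the Claim_ definition above) =====
theorem freeAgent_spec : Claim_equal_freeAgent := by
  intro r state _ hpre
  unfold Spec_freeAgent freeAgent freeAgent_alt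
  cases hget : PySem.List.pyGet? state r with
  | none =>
    exact absurd hpre (by simpa [PySem.List.pyGet?_eq_none_iff] using hget)
  | some row =>
    simpa using row_case_eq row r
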